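-- pv_equiv track=rewrite | github.com/fabian12341/AgileAvengers | Python/text_analysis.py | extract_speaker_transcripts
-- ===== SOURCE A (Python) =====
-- def extract_speaker_transcripts(segments):
--
--     # Dictionary to store transcripts for each speaker
--     speaker_transcripts = {}
--
--     for segment in segments:
--         speaker = segment["speaker"]
--         temp_segment = segment["text"]
--
--         # Add the segment to the corresponding speaker's transcript
--         if speaker not in speaker_transcripts:
--             speaker_transcripts[speaker] = ""  # Initialize if speaker not in dictionary
--         speaker_transcripts[speaker] += temp_segment
--
--     return speaker_transcripts
-- ===== SOURCE B (Python) =====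
-- def extract_speaker_transcripts(segments):
--     # Two staged passes: first the ordered list of distinct speakers,
--     # then one full scan of segments per speaker, joining its fragments.
--     speakers = []
--     for segment in segments:
--         if segment["speaker"] not in speakers:
--             speakers.append(segment["speaker"])
--     return {
--         sp: "".join(segment["text"] for segment in segments if segment["speaker"] == sp)
--         for sp in speakers
--     }
-- ===== Notes on version B (the rewrite author's own statement) =====
-- stated objective: alternative
-- what changed: B replaces A's single-pass dict accumulation (string += per segment) with a staged nested-scan algorithm: it first builds the ordered list of distinct speakers, then for each speaker re-scans all segments and joins that speaker's fragments in one ''.join.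
import Mathlib
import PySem

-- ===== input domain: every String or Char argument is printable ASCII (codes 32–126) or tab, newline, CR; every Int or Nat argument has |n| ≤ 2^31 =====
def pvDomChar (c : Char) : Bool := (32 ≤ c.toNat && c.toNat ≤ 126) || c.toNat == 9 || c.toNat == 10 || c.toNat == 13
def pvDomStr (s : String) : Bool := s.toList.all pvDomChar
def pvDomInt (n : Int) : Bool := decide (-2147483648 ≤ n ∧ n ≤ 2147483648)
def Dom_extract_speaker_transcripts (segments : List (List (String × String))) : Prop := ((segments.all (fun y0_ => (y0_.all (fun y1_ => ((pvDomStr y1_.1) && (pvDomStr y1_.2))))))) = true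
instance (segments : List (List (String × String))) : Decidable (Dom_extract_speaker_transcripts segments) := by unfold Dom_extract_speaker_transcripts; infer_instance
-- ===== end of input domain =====

-- B replaces A's single-pass dict accumulation with a staged nested-scan algorithm (ordered distinct
-- speakers first, then one full scan + join per speaker); equality of return values is proved.

-- ===== PORT A =====
-- segment["speaker"] / segment["text"]: first-match lookup; KeyError (none) is excluded by Pre_, the port skips such a segment.
def extract_speaker_transcripts (segments : List (List (String × String))) : List (String × String) :=
  (segments.foldl (fun speaker_transcripts segment =>
      match (PySem.Dict.mk segment).get? "speaker", (PySem.Dict.mk segment).get? "text" with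
      | some speaker, some temp_segment =>
          let d1 := if speaker_transcripts.contains speaker then speaker_transcripts
                    else speaker_transcripts.insert speaker ""
          d1.insert speaker (d1.getD speaker "" ++ temp_segment)
      | _, _ => speaker_transcripts
    ) PySem.Dict.empty).items

-- ===== PORT B =====
-- First loop: the ordered list of distinct speakers (`not in` / append). Then the dict comprehension:
-- for each speaker, one filterMap scan of all segments collecting matching texts, joined by "".join.
-- KeyError lookups (none) are excluded by Pre_; the port skips such a segment.
def extract_speaker_transcripts_alt (segments : List (List (String × String))) : List (String × String) :=
  let speakers := segments.foldl (fun speakers segment =>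
      match (PySem.Dict.mk segment).get? "speaker" with
      | some sp => if speakers.contains sp then speakers else speakers ++ [sp]
      | none => speakers) []
  speakers.map (fun sp =>
    (sp, PySem.Str.join "" (segments.filterMap (fun segment =>
          match (PySem.Dict.mk segment).get? "speaker" with
          | some s => if s == sp then (PySem.Dict.mk segment).get? "text" else none
          | none => none))))

-- ===== PRECONDITION & SPEC =====
-- Pre_ excludes exactly the segments missing a "speaker" or "text" key, on which the Python A raises KeyError.
def Pre_extract_speaker_transcripts (segments : List (List (String × String))) : Prop :=
  ∀ segment ∈ segments, ((PySem.Dict.mk segment).get? "speaker").isSome ∧ ((PySem.Dict.mk segment).get? "text").isSome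
instance (segments : List (List (String × String))) : Decidable (Pre_extract_speaker_transcripts segments) := by unfold Pre_extract_speaker_transcripts; infer_instance

def pvWitness_extract_speaker_transcripts : (List (List (String × String))) :=
  [[("speaker", "alice"), ("text", "hi ")], [("speaker", "bob"), ("text", "yo")], [("speaker", "alice"), ("text", "there")]]

def Spec_extract_speaker_transcripts (segments : List (List (String × String))) (out : List (String × String)) : Prop := out = extract_speaker_transcripts_alt segments
instance (segments : List (List (String × String))) (out : List (String × String)) : Decidable (Spec_extract_speaker_transcripts segments out) := by unfold Spec_extract_speaker_transcripts; infer_instance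

-- ===== CLAIM (what is proved, stated in full; the proofs are below) =====
def Claim_equal_extract_speaker_transcripts : Prop := ∀ (segments : List (List (String × String))), Dom_extract_speaker_transcripts segments → Pre_extract_speaker_transcripts segments → Spec_extract_speaker_transcripts segments (extract_speaker_transcripts segments)

-- ===== LEMMAS AND PROOFS =====

-- extract the (speaker, text) pair of a segment, if both keys are present
def pvPair (segment : List (String × String)) : Option (String × String) :=
  match (PySem.Dict.mk segment).get? "speaker", (PySem.Dict.mk segment).get? "text" with
  | some sp, some tx => some (sp, tx)
  | _, _ => none

-- the ordered distinct first components of `pairs`, starting from `l`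
def pvSps (l : List String) (pairs : List (String × String)) : List String :=
  pairs.foldl (fun l p => if l.contains p.1 then l else l ++ [p.1]) l

-- concatenation of the seconds of the pairs whose first is `sp`
def pvCat (pairs : List (String × String)) (sp : String) : String :=
  PySem.Str.join "" ((pairs.filter (fun p => p.1 == sp)).map Prod.snd)

-- PySem.Chars.join with an empty separator is flatten
lemma pvChars_join_nil_sep (cs : List (List Char)) : PySem.Chars.join [] cs = cs.flatten := by
  induction cs with
  | nil => rfl
  | cons c cs ih => cases cs with
    | nil => simp [PySem.Chars.join, List.intercalate]
    | cons d ds => simp_all [PySem.Chars.join, List.intercalate, List.intersperse]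

lemma pvJoin_snoc (l : List String) (t : String) :
    PySem.Str.join "" (l ++ [t]) = PySem.Str.join "" l ++ t := by
  apply String.toList_injective
  rw [String.toList_append]
  simp [PySem.Str.toList_join, pvChars_join_nil_sep]

lemma pvSps_snoc (l : List String) (pairs : List (String × String)) (q : String × String) :
    pvSps l (pairs ++ [q]) =
      (if (pvSps l pairs).contains q.1 then pvSps l pairs else pvSps l pairs ++ [q.1]) := by
  simp [pvSps, List.foldl_append]

lemma pvMem_sps_init (l : List String) (pairs : List (String × String)) (a : String)
    (h : a ∈ l) : a ∈ pvSps l pairs := by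
  induction pairs generalizing l with
  | nil => exact h
  | cons p ps ih =>
    simp only [pvSps, List.foldl_cons]
    split
    · exact ih l h
    · exact ih _ (List.mem_append_left _ h)

lemma pvFst_mem_sps (l : List String) (pairs : List (String × String)) (p : String × String)
    (h : p ∈ pairs) : p.1 ∈ pvSps l pairs := by
  induction pairs generalizing l with
  | nil => cases h
  | cons q qs ih =>
    simp only [pvSps, List.foldl_cons]
    rcases List.mem_cons.mp h with rfl | h
    · split
      · next hc => exact pvMem_sps_init _ _ _ (List.contains_iff_mem.mp hc)
      · exact pvMem_sps_init _ _ _ (List.mem_append_right _ (List.mem_singleton.mpr rfl))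
    · exact ih _ h

lemma pvFind_map_of_mem (S : List String) (pairs : List (String × String)) (k : String)
    (h : k ∈ S) :
    (S.map (fun sp => (sp, pvCat pairs sp))).find? (fun p => p.1 == k)
      = some (k, pvCat pairs k) := by
  induction S with
  | nil => cases h
  | cons s S ih =>
    rw [List.map_cons]
    by_cases hs : s = k
    · subst hs; exact List.find?_cons_of_pos (by simp)
    · rw [List.find?_cons_of_neg (by simpa using hs)]
      exact ih ((List.mem_cons.mp h).resolve_left (fun e => hs e.symm))

lemma pvFind_map_of_not_mem (S : List String) (pairs : List (String × String)) (k : String)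
    (h : k ∉ S) :
    (S.map (fun sp => (sp, pvCat pairs sp))).find? (fun p => p.1 == k) = none := by
  induction S with
  | nil => rfl
  | cons s S ih =>
    have hs : s ≠ k := fun e => h (e ▸ List.mem_cons_self ..)
    rw [List.map_cons, List.find?_cons_of_neg (by simpa using hs)]
    exact ih (fun hm => h (List.mem_cons_of_mem _ hm))

lemma pvGet?_eq_find? {ν : Type} (d : PySem.Dict String ν) (k : String) :
    d.get? k = (d.items.find? (fun p => p.1 == k)).map (fun p => p.2) := rfl

lemma pvCat_snoc (pairs : List (String × String)) (q : String × String) (sp : String) :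
    pvCat (pairs ++ [q]) sp = if q.1 = sp then pvCat pairs sp ++ q.2 else pvCat pairs sp := by
  unfold pvCat
  rw [List.filter_append]
  by_cases h : q.1 = sp
  · simp [h, pvJoin_snoc]
  · simp [h]

lemma pvCat_of_not_mem_sps (pairs : List (String × String)) (k : String)
    (h : k ∉ pvSps [] pairs) : pvCat pairs k = "" := by
  unfold pvCat
  have hnil : pairs.filter (fun p => p.1 == k) = [] := by
    rw [List.filter_eq_nil_iff]
    intro p hp
    simp only [beq_iff_eq]
    exact fun he => h (he ▸ pvFst_mem_sps [] pairs p hp)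
  rw [hnil]
  rfl

-- main invariant: A's accumulation dict lists exactly (speaker, joined texts) in first-occurrence order
lemma pvMain (pairs : List (String × String)) :
    (pairs.foldl (fun a p => a.insert p.1 (a.getD p.1 "" ++ p.2)) PySem.Dict.empty).items
      = (pvSps [] pairs).map (fun sp => (sp, pvCat pairs sp)) := by
  induction pairs using List.reverseRecOn with
  | nil => rfl
  | append_singleton pairs q ih =>
    rw [List.foldl_append, List.foldl_cons, List.foldl_nil]
    set d := pairs.foldl (fun a p => a.insert p.1 (a.getD p.1 "" ++ p.2)) PySem.Dict.empty with hd
    rw [pvSps_snoc]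
    by_cases hmem : q.1 ∈ pvSps [] pairs
    · have hget : d.get? q.1 = some (pvCat pairs q.1) := by
        rw [pvGet?_eq_find?, ih, pvFind_map_of_mem _ _ _ hmem]; rfl
      have hcont : d.contains q.1 = true := by
        rw [PySem.Dict.contains_eq_isSome_get?, hget]; rfl
      rw [PySem.Dict.items_insert_of_contains _ _ hcont,
        PySem.Dict.getD_of_get?_eq_some d "" hget, ih, List.map_map,
        if_pos (List.contains_iff_mem.mpr hmem)]
      apply List.map_congr_left
      intro sp _
      by_cases h : sp = q.1
      · subst h; simp [pvCat_snoc]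
      · simp [Function.comp, h, pvCat_snoc]
        intro he
        exact absurd he.symm h
    · have hget : d.get? q.1 = none := by
        rw [pvGet?_eq_find?, ih, pvFind_map_of_not_mem _ _ _ hmem]; rfl
      have hcont : d.contains q.1 = false := by
        rw [PySem.Dict.contains_eq_isSome_get?, hget]; rfl
      rw [PySem.Dict.items_insert_of_not_contains _ _ hcont,
        PySem.Dict.getD_of_get?_eq_none d "" hget, ih,
        if_neg (by simpa using hmem), List.map_append]
      congr 1
      · apply List.map_congr_left
        intro sp hsp
        rw [pvCat_snoc, if_neg (fun he : q.1 = sp => hmem (he.symm ▸ hsp))]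
      · simp [pvCat_snoc, pvCat_of_not_mem_sps pairs q.1 hmem]

-- A's setdefault-then-concatenate step collapses to one insert
lemma pvStepA_collapse (d : PySem.Dict String String) (sp tx : String) :
    (if d.contains sp then d else d.insert sp "").insert sp
        ((if d.contains sp then d else d.insert sp "").getD sp "" ++ tx)
      = d.insert sp (d.getD sp "" ++ tx) := by
  by_cases h : d.contains sp
  · simp [h]
  · simp only [h, Bool.false_eq_true, if_neg, not_false_iff]
    rw [PySem.Dict.getD_insert_self, PySem.Dict.insert_insert_self,
      PySem.Dict.getD_of_not_contains d "" (by simp [h])]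

-- A's fold over segments is the corresponding fold over the extracted pairs
lemma pvFoldA (segments : List (List (String × String))) (d : PySem.Dict String String) :
    segments.foldl (fun speaker_transcripts segment =>
      match (PySem.Dict.mk segment).get? "speaker", (PySem.Dict.mk segment).get? "text" with
      | some speaker, some temp_segment =>
          let d1 := if speaker_transcripts.contains speaker then speaker_transcripts
                    else speaker_transcripts.insert speaker ""
          d1.insert speaker (d1.getD speaker "" ++ temp_segment)
      | _, _ => speaker_transcripts) d
    = (segments.filterMap pvPair).foldl (fun a p => a.insert p.1 (a.getD p.1 "" ++ p.2)) d := by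
  induction segments generalizing d with
  | nil => rfl
  | cons seg segs ih =>
    cases hs : (PySem.Dict.mk seg).get? "speaker" <;>
      cases ht : (PySem.Dict.mk seg).get? "text" <;>
      simp only [List.foldl_cons, List.filterMap_cons, pvPair, hs, ht]
    case some.some sp tx => rw [pvStepA_collapse]; exact ih _
    all_goals exact ih _

-- B's first loop over segments is pvSps over the extracted pairs (under Pre_: "text" is present)
lemma pvSpeakersB (segments : List (List (String × String))) (l : List String)
    (hpre : ∀ segment ∈ segments, ((PySem.Dict.mk segment).get? "speaker").isSome
              ∧ ((PySem.Dict.mk segment).get? "text").isSome) :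
    segments.foldl (fun speakers segment =>
      match (PySem.Dict.mk segment).get? "speaker" with
      | some sp => if speakers.contains sp then speakers else speakers ++ [sp]
      | none => speakers) l
    = pvSps l (segments.filterMap pvPair) := by
  induction segments generalizing l with
  | nil => rfl
  | cons seg segs ih =>
    obtain ⟨h1, h2⟩ := hpre seg (List.mem_cons_self ..)
    obtain ⟨sp, hs⟩ := Option.isSome_iff_exists.mp h1
    obtain ⟨tx, ht⟩ := Option.isSome_iff_exists.mp h2
    simp only [List.foldl_cons, List.filterMap_cons, pvPair, hs, ht, pvSps]
    exact ih _ (fun s hsm => hpre s (List.mem_cons_of_mem _ hsm))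

-- B's per-speaker scan over segments collects exactly the seconds of the matching pairs
lemma pvValsB (segments : List (List (String × String))) (sp : String) :
    segments.filterMap (fun segment =>
      match (PySem.Dict.mk segment).get? "speaker" with
      | some s => if s == sp then (PySem.Dict.mk segment).get? "text" else none
      | none => none)
    = ((segments.filterMap pvPair).filter (fun p => p.1 == sp)).map Prod.snd := by
  induction segments with
  | nil => rfl
  | cons seg segs ih =>
    rw [List.filterMap_cons, List.filterMap_cons, ih]
    cases hs : (PySem.Dict.mk seg).get? "speaker" <;>
      cases ht : (PySem.Dict.mk seg).get? "text" <;>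
      simp only [pvPair, hs, ht]
    case some.some s tx =>
      by_cases h : s = sp <;> simp [h]
    case some.none s =>
      by_cases h : s = sp <;> simp [h]

-- ===== VERDICT (by name: the statement is the Claim_ definition above) =====
theorem extract_speaker_transcripts_spec : Claim_equal_extract_speaker_transcripts := by
  intro segments _ hpre
  unfold Spec_extract_speaker_transcripts extract_speaker_transcripts extract_speaker_transcripts_alt
  rw [pvFoldA, pvMain, pvSpeakersB segments [] hpre]
  apply List.map_congr_left
  intro sp _
  rw [pvValsB]
  rfl
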